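-- pv_equiv track=rewrite | github.com/xuefengCrown/Files_01_xuef | all_xuef/程序员练级+Never/xuef code/xuef_code_python/system_rebuild_plan/TemplateEngine/my_impl/sub_module.py | _expr_code
-- ===== SOURCE A (Python) =====
-- def _expr_code(expr):
--         """Generate a Python expression for `expr`."""
--         if "|" in expr:
--             pipes = expr.split("|")
--             code = _expr_code(pipes[0])
--             for func in pipes[1:]:
--                 code = "%s(%s)" % (func, code)
--         elif "." in expr:
--             dots = expr.split(".")
--             code = _expr_code(dots[0])
--             args = ", ".join(repr(d) for d in dots[1:])
--             code = "do_dots(%s, %s)" % (code, args)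
--         else:
--             code = "%s" % expr
--         return code
-- ===== SOURCE B (Python) =====
-- def _expr_code(expr):
--     """Generate a Python expression for `expr`."""
--     pipes = expr.split("|")
--     base = pipes[0]
--     if "." in base:
--         dots = base.split(".")
--         code = "do_dots(%s, %s)" % (dots[0], ", ".join(repr(d) for d in dots[1:]))
--     else:
--         code = base
--     for func in pipes[1:]:
--         code = "%s(%s)" % (func, code)
--     return code
-- ===== Notes on version B (the rewrite author's own statement) =====
-- stated objective: simpler
-- what changed: Replaces A's recursion with a single iterative pass: split on the pipe separator once, handle the pipe-free base segment's dotted parts directly, then fold the remaining pipe functions over the accumulated code.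
import Mathlib
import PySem

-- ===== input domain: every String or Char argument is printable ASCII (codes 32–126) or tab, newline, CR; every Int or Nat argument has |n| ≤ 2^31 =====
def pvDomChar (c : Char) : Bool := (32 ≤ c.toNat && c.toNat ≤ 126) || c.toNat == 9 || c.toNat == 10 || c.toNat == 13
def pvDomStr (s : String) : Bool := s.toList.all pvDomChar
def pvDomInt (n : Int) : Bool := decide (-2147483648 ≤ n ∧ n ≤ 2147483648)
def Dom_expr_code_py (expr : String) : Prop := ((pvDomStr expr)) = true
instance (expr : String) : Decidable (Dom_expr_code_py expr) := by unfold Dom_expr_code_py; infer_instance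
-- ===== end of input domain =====

-- B flattens A's recursion into one iterative pass (split on '|' once, handle the pipe-free base, then fold the pipe functions); return values proved equal on all inputs.

-- Python's repr(s) for strings over the Dom alphabet (printable ASCII + tab/newline/CR):
-- quote choice (single quote unless s contains ' and no "), escapes \\ , the chosen quote, \t \n \r.
-- Exact on that alphabet; used by both ports (both Pythons call the built-in repr).
def pvReprChars (s : List Char) : List Char :=
  let q : Char := if '\'' ∈ s ∧ '"' ∉ s then '"' else '\''
  q :: s.flatMap (fun c =>
    if c = '\\' then ['\\', '\\']
    else if c = q then ['\\', q]
    else if c = '\t' then ['\\', 't']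
    else if c = '\n' then ['\\', 'n']
    else if c = '\r' then ['\\', 'r']
    else [c]) ++ [q]

-- Structural form of s.split(c) for a one-character separator; needed (with the lemmas
-- below) by Port A's decreasing_by, so it stays above the ports.
def pvSplitChar (c : Char) : List Char → List (List Char)
  | [] => [[]]
  | x :: t =>
      if x = c then [] :: pvSplitChar c t
      else
        match pvSplitChar c t with
        | [] => [[x]]
        | p :: ps => (x :: p) :: ps

theorem pvSplitChar_ne_nil (c : Char) (s : List Char) : pvSplitChar c s ≠ [] := by
  induction s with
  | nil => simp [pvSplitChar]
  | cons x t ih =>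
      simp only [pvSplitChar]
      split
      · simp
      · rcases h : pvSplitChar c t with _ | ⟨p, ps⟩ <;> simp

theorem pv_go_eq (c : Char) (fuel : Nat) (l cur : List Char) (acc : List (List Char))
    (h : l.length ≤ fuel) :
    PySem.Chars.splitOn.go [c] fuel l cur acc =
      acc.reverse ++ ((cur.reverse ++ (pvSplitChar c l).headI) :: (pvSplitChar c l).tail) := by
  induction fuel generalizing l cur acc with
  | zero =>
      have : l = [] := by cases l <;> simp_all
      subst this
      simp [PySem.Chars.splitOn.go, pvSplitChar]
  | succ n ih =>
      cases l with
      | nil => simp [PySem.Chars.splitOn.go, pvSplitChar]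
      | cons x t =>
          have hlen : t.length ≤ n := by simpa using h
          by_cases hx : x = c
          · subst hx
            rw [PySem.Chars.splitOn.go]
            rw [if_pos (by simp [List.isPrefixOf])]
            simp only [List.length_singleton, List.drop_succ_cons, List.drop_zero]
            rw [ih t [] (cur.reverse :: acc) hlen]
            obtain ⟨p, ps, hsp⟩ := List.exists_cons_of_ne_nil (pvSplitChar_ne_nil x t)
            rw [hsp]
            simp [pvSplitChar, hsp]
          · rw [PySem.Chars.splitOn.go]
            rw [if_neg (by simp [List.isPrefixOf]; exact fun hc => hx hc.symm)]
            rw [ih t (x :: cur) acc hlen]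
            simp only [pvSplitChar, if_neg hx]
            obtain ⟨p, ps, hsp⟩ := List.exists_cons_of_ne_nil (pvSplitChar_ne_nil c t)
            rw [hsp]
            simp

theorem pv_splitOn_eq (c : Char) (s : List Char) :
    PySem.Chars.splitOn s [c] = pvSplitChar c s := by
  unfold PySem.Chars.splitOn
  rw [pv_go_eq c (s.length + 1) s [] [] (by omega)]
  rcases h : pvSplitChar c s with _ | ⟨p, ps⟩
  · exact absurd h (pvSplitChar_ne_nil c s)
  · simp

theorem pv_isIn_singleton (c : Char) (s : List Char) :
    PySem.Chars.isIn [c] s = true ↔ c ∈ s := by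
  rw [PySem.Chars.isIn_iff_infix]
  constructor
  · intro h; exact h.subset (by simp)
  · intro h
    rcases List.mem_iff_append.mp h with ⟨a, b, rfl⟩
    exact ⟨a, b, by simp⟩

theorem pv_headI_lt (c : Char) (s : List Char) (h : c ∈ s) :
    (pvSplitChar c s).headI.length < s.length := by
  induction s with
  | nil => simp at h
  | cons x t ih =>
      simp only [pvSplitChar]
      by_cases hx : x = c
      · simp [hx]
      · rw [if_neg hx]
        have hct : c ∈ t := by
          rcases List.mem_cons.mp h with hc | hc
          · exact absurd hc.symm hx
          · exact hc
        obtain ⟨p, ps, hsp⟩ := List.exists_cons_of_ne_nil (pvSplitChar_ne_nil c t)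
        have := ih hct
        rw [hsp] at this ⊢
        simpa using Nat.succ_lt_succ this

-- ===== PORT A =====
def pvExprCodeA (e : List Char) : List Char :=
  if h1 : PySem.Chars.isIn ['|'] e = true then
    -- pipes = expr.split("|"); code = _expr_code(pipes[0]); for func in pipes[1:] …
    let pipes := PySem.Chars.splitOn e ['|']
    let code := pvExprCodeA pipes.headI
    pipes.tail.foldl (fun code func => func ++ '(' :: code ++ [')']) code
  else if h2 : PySem.Chars.isIn ['.'] e = true then
    -- dots = expr.split("."); code = _expr_code(dots[0]); args = ", ".join(repr(d) for d in dots[1:])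
    let dots := PySem.Chars.splitOn e ['.']
    let code := pvExprCodeA dots.headI
    let args := PySem.Chars.join [',', ' '] (dots.tail.map pvReprChars)
    ("do_dots(".toList ++ code ++ [',', ' '] ++ args) ++ [')']
  else e
termination_by e.length
decreasing_by
  · rw [pv_splitOn_eq]; exact pv_headI_lt _ _ ((pv_isIn_singleton _ _).1 h1)
  · rw [pv_splitOn_eq]; exact pv_headI_lt _ _ ((pv_isIn_singleton _ _).1 h2)

def expr_code_py (expr : String) : String := String.ofList (pvExprCodeA expr.toList)

-- ===== PORT B =====
def pvExprCodeB (e : List Char) : List Char :=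
  let pipes := PySem.Chars.splitOn e ['|']
  let base := pipes.headI
  let code :=
    if PySem.Chars.isIn ['.'] base = true then
      let dots := PySem.Chars.splitOn base ['.']
      ("do_dots(".toList ++ dots.headI ++ [',', ' '] ++
        PySem.Chars.join [',', ' '] (dots.tail.map pvReprChars)) ++ [')']
    else base
  pipes.tail.foldl (fun code func => func ++ '(' :: code ++ [')']) code

def expr_code_py_alt (expr : String) : String := String.ofList (pvExprCodeB expr.toList)

-- ===== PRECONDITION & SPEC =====
def Spec_expr_code_py (expr : String) (out : String) : Prop := out = expr_code_py_alt expr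
instance (expr : String) (out : String) : Decidable (Spec_expr_code_py expr out) := by unfold Spec_expr_code_py; infer_instance

-- ===== CLAIM (what is proved, stated in full; the proofs are below) =====
def Claim_equal_expr_code_py : Prop := ∀ (expr : String), Dom_expr_code_py expr → Spec_expr_code_py expr (expr_code_py expr)

-- ===== LEMMAS AND PROOFS =====

theorem pv_mem_of_mem_splitChar (c : Char) (s p : List Char) (hp : p ∈ pvSplitChar c s) :
    ∀ x ∈ p, x ∈ s := by
  induction s generalizing p with
  | nil =>
      simp only [pvSplitChar, List.mem_singleton] at hp
      subst hp; simp
  | cons y t ih =>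
      simp only [pvSplitChar] at hp
      obtain ⟨q, qs, hsp⟩ := List.exists_cons_of_ne_nil (pvSplitChar_ne_nil c t)
      by_cases hy : y = c
      · rw [if_pos hy] at hp
        rcases List.mem_cons.mp hp with rfl | hp
        · simp
        · intro x hx; exact List.mem_cons_of_mem _ (ih p hp x hx)
      · rw [if_neg hy, hsp] at hp
        rcases List.mem_cons.mp hp with rfl | hp
        · intro x hx
          rcases List.mem_cons.mp hx with rfl | hx
          · simp
          · exact List.mem_cons_of_mem _ (ih q (by rw [hsp]; simp) x hx)
        · intro x hx
          exact List.mem_cons_of_mem _ (ih p (by rw [hsp]; simp [hp]) x hx)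

theorem pv_not_mem_splitChar (c : Char) (s p : List Char) (hp : p ∈ pvSplitChar c s) :
    c ∉ p := by
  induction s generalizing p with
  | nil =>
      simp only [pvSplitChar, List.mem_singleton] at hp
      subst hp; simp
  | cons y t ih =>
      simp only [pvSplitChar] at hp
      obtain ⟨q, qs, hsp⟩ := List.exists_cons_of_ne_nil (pvSplitChar_ne_nil c t)
      by_cases hy : y = c
      · rw [if_pos hy] at hp
        rcases List.mem_cons.mp hp with rfl | hp
        · simp
        · exact ih p hp
      · rw [if_neg hy, hsp] at hp
        rcases List.mem_cons.mp hp with rfl | hp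
        · intro hx
          rcases List.mem_cons.mp hx with hx | hx
          · exact hy hx.symm
          · exact ih q (by rw [hsp]; simp) hx
        · exact ih p (by rw [hsp]; simp [hp])

theorem pv_splitChar_of_not_mem (c : Char) (s : List Char) (h : c ∉ s) :
    pvSplitChar c s = [s] := by
  induction s with
  | nil => simp [pvSplitChar]
  | cons x t ih =>
      have hx : x ≠ c := fun hc => h (by simp [hc])
      have ht : c ∉ t := fun hc => h (List.mem_cons_of_mem _ hc)
      simp only [pvSplitChar, if_neg hx, ih ht]

theorem pv_headI_mem (c : Char) (s : List Char) : (pvSplitChar c s).headI ∈ pvSplitChar c s := by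
  rcases h : pvSplitChar c s with _ | ⟨p, ps⟩
  · exact absurd h (pvSplitChar_ne_nil c s)
  · simp

-- A on a pipe-free input: one unfolding, with the inner recursive call collapsed.
theorem pvA_no_pipe (e : List Char) (hp : '|' ∉ e) :
    pvExprCodeA e =
      if PySem.Chars.isIn ['.'] e = true then
        ("do_dots(".toList ++ (pvSplitChar '.' e).headI ++ [',', ' '] ++
          PySem.Chars.join [',', ' '] ((pvSplitChar '.' e).tail.map pvReprChars)) ++ [')']
      else e := by
  have hpipe : PySem.Chars.isIn ['|'] e = false := by
    rcases h : PySem.Chars.isIn ['|'] e with _ | _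
    · rfl
    · exact absurd ((pv_isIn_singleton _ _).1 h) hp
  rw [pvExprCodeA]
  rw [dif_neg (by simp [hpipe])]
  by_cases hdot : PySem.Chars.isIn ['.'] e = true
  · rw [dif_pos hdot, if_pos hdot]
    have hhead : pvExprCodeA (pvSplitChar '.' e).headI = (pvSplitChar '.' e).headI := by
      have hmem := pv_headI_mem '.' e
      have hnd : '.' ∉ (pvSplitChar '.' e).headI := pv_not_mem_splitChar _ _ _ hmem
      have hnp : '|' ∉ (pvSplitChar '.' e).headI :=
        fun hx => hp (pv_mem_of_mem_splitChar _ _ _ hmem _ hx)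
      rw [pvExprCodeA]
      rw [dif_neg (by
        rcases h : PySem.Chars.isIn ['|'] (pvSplitChar '.' e).headI with _ | _
        · simp
        · exact absurd ((pv_isIn_singleton _ _).1 h) hnp)]
      rw [dif_neg (by
        rcases h : PySem.Chars.isIn ['.'] (pvSplitChar '.' e).headI with _ | _
        · simp
        · exact absurd ((pv_isIn_singleton _ _).1 h) hnd)]
    simp only [pv_splitOn_eq, hhead]
  · rw [dif_neg hdot, if_neg hdot]

theorem pv_main (e : List Char) : pvExprCodeA e = pvExprCodeB e := by
  unfold pvExprCodeB
  by_cases hpipe : PySem.Chars.isIn ['|'] e = true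
  · rw [pvExprCodeA, dif_pos hpipe]
    simp only [pv_splitOn_eq]
    have hmem := pv_headI_mem '|' e
    have hnp : '|' ∉ (pvSplitChar '|' e).headI := pv_not_mem_splitChar _ _ _ hmem
    rw [pvA_no_pipe _ hnp]
  · have hnp : '|' ∉ e := fun hx => hpipe ((pv_isIn_singleton _ _).2 hx)
    rw [pvA_no_pipe e hnp]
    simp only [pv_splitOn_eq, pv_splitChar_of_not_mem '|' e hnp]
    simp

-- ===== VERDICT (by name: the statement is the Claim_ definition above) =====
theorem expr_code_py_spec : Claim_equal_expr_code_py := by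
  intro expr _
  unfold Spec_expr_code_py expr_code_py expr_code_py_alt
  rw [pv_main]
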